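-- pv_equiv track=rewrite | github.com/NovaPlusCoding/Infytq-Assignment-Solution | Programming-Fundamentals-Using-Python/Day9/Practice-Exercise/Level2/problem40.py | index_of_max_unique
-- ===== SOURCE A (Python) =====
-- def index_of_max_unique(num_list):
--     list_set = [list(set(i)) for i in num_list]
--     m = max([len(i) for i in list_set])
--     for i,x in enumerate(list_set):
--         if len(x) == m:
--             index = i
--             break
--     return index
-- ===== SOURCE B (Python) =====
-- def index_of_max_unique(num_list):
--     best_count = -1
--     best_index = None
--     for i, sub in enumerate(num_list):
--         c = len(set(sub))
--         if c > best_count: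
--             best_count = c
--             best_index = i
--     if best_index is None:
--         raise ValueError("index_of_max_unique() arg is an empty sequence")
--     return best_index
-- ===== Notes on version B (the rewrite author's own statement) =====
-- stated objective: simpler
-- what changed: Replaces A's three passes (build list of sets, max over lengths, rescan for the first index hitting the max) by one pass over enumerate keeping a running best count (strict > keeps the earliest index).
-- outside the precondition, e.g. on index_of_max_unique([]): A raises ValueError, B raises ValueError
import Mathlib
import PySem

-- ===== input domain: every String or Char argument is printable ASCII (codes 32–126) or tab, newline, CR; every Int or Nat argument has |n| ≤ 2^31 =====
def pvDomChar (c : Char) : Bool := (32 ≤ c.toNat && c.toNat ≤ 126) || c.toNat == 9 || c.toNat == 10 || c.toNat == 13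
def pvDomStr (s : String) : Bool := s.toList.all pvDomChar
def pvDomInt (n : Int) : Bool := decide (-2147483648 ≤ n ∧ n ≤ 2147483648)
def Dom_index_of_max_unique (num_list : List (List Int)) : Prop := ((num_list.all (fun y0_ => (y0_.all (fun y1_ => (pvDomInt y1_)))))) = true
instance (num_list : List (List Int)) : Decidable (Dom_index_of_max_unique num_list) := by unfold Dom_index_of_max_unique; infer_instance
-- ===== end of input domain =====

-- B replaces A's three passes (set-list, max of lengths, rescan) by a single pass keeping a
-- running best count; both raise on an empty list (excluded by Pre_). Objective: simpler.


-- ===== PORT A =====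
-- the 'for i,x in enumerate(list_set): if len(x)==m: index=i; break' loop
def pvFindA (list_set : List (PySem.Set Int)) (m : Int) (i : Int) : Int :=
  match list_set with
  | [] => 0          -- unreachable: m is the max of the lengths, so the break always fires
  | x :: rest => if (x.length : Int) = m then i else pvFindA rest m (i + 1)

def index_of_max_unique (num_list : List (List Int)) : Int :=
  let list_set := num_list.map (fun i => (PySem.Set.ofList i : PySem.Set Int))
  match PySem.List.max? (list_set.map (fun i => (i.length : Int))) (fun y => y) with
  | none => 0        -- Python: max([]) raises ValueError; excluded by Pre_
  | some m => pvFindA list_set m 0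

-- ===== PORT B =====
def index_of_max_unique_alt (num_list : List (List Int)) : Int :=
  let res := (PySem.List.enumerate num_list 0).foldl
    (fun (st : Int × Option Int) p =>
      let c : Int := ((PySem.Set.ofList p.2 : PySem.Set Int).length : Int)
      if c > st.1 then (c, some p.1) else st)
    (-1, none)
  match res.2 with
  | none => 0        -- B raises ValueError here; excluded by Pre_
  | some i => i

-- ===== PRECONDITION & SPEC =====
-- Pre_ excludes only the empty list, on which both A (max([])) and B raise ValueError.
def Pre_index_of_max_unique (num_list : List (List Int)) : Prop := num_list ≠ []
instance (num_list : List (List Int)) : Decidable (Pre_index_of_max_unique num_list) := by unfold Pre_index_of_max_unique; infer_instance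
def pvWitness_index_of_max_unique : List (List Int) := [[1, 2, 2], [3]]

def Spec_index_of_max_unique (num_list : List (List Int)) (out : Int) : Prop := out = index_of_max_unique_alt num_list
instance (num_list : List (List Int)) (out : Int) : Decidable (Spec_index_of_max_unique num_list out) := by unfold Spec_index_of_max_unique; infer_instance

-- ===== CLAIM (what is proved, stated in full; the proofs are below) =====
def Claim_equal_index_of_max_unique : Prop := ∀ (num_list : List (List Int)), Dom_index_of_max_unique num_list → Pre_index_of_max_unique num_list → Spec_index_of_max_unique num_list (index_of_max_unique num_list)

-- ===== LEMMAS AND PROOFS =====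

def pvCnt (s : List Int) : Int := ((PySem.Set.ofList s : PySem.Set Int).length : Int)

def pvStep (st : Int × Option Int) (p : Int × List Int) : Int × Option Int :=
  if pvCnt p.2 > st.1 then (pvCnt p.2, some p.1) else st

theorem pvCnt_nonneg (s : List Int) : 0 ≤ pvCnt s := Int.natCast_nonneg _

theorem pvAlt_eq (l : List (List Int)) :
    index_of_max_unique_alt l =
      match (List.foldl pvStep (-1, none) (PySem.List.enumerate l 0)).2 with
      | none => 0
      | some i => i := rfl

theorem pvFoldl_max_init (cs : List Int) (a b : Int) :
    cs.foldl max (max a b) = max a (cs.foldl max b) := by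
  induction cs generalizing b with
  | nil => rfl
  | cons d cs ih =>
      simp only [List.foldl_cons, max_assoc, ih]

theorem pvMax?_cons_of_ne (c : Int) (cs : List Int) (M : Int)
    (h : PySem.List.max? (c :: cs) (fun y => y) = some M) (hne : c ≠ M) :
    PySem.List.max? cs (fun y => y) = some M := by
  rw [PySem.List.max?_id_cons] at h
  cases cs with
  | nil => simp at h; exact absurd h hne
  | cons d cs' =>
      rw [PySem.List.max?_id_cons]
      simp only [List.foldl_cons] at h ⊢
      have h2 : cs'.foldl max (max c d) = max c (cs'.foldl max d) := pvFoldl_max_init cs' c d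
      rw [h2] at h
      injection h with h
      rcases max_choice c (cs'.foldl max d) with hc | hc
      · exact absurd (hc.symm.trans h) hne
      · exact congrArg some (hc.symm.trans h)

-- L1: once the running best dominates every remaining count, the fold is the identity
theorem pvFold_stop (l : List (List Int)) (s b : Int) (o : Option Int)
    (h : ∀ t ∈ l, pvCnt t ≤ b) :
    List.foldl pvStep (b, o) (PySem.List.enumerate l s) = (b, o) := by
  induction l generalizing s with
  | nil => simp [PySem.List.enumerate_nil]
  | cons t rest ih =>
      rw [PySem.List.enumerate_cons, List.foldl_cons]
      have ht : pvCnt t ≤ b := h t (List.mem_cons_self ..)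
      have : pvStep (b, o) (s, t) = (b, o) := by
        simp only [pvStep]; rw [if_neg (by omega)]
      rw [this]
      exact ih (s + 1) (fun u hu => h u (List.mem_cons_of_mem _ hu))

-- L2: below the maximum, the fold finds the maximum and the FIRST index achieving it
theorem pvFold_main (l : List (List Int)) (s b : Int) (o : Option Int) (M : Int)
    (hm : PySem.List.max? (l.map pvCnt) (fun y => y) = some M) (hb : b < M) :
    List.foldl pvStep (b, o) (PySem.List.enumerate l s) =
      (M, some (pvFindA (l.map (fun i => (PySem.Set.ofList i : PySem.Set Int))) M s)) := by
  induction l generalizing s b o with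
  | nil => simp [PySem.List.max?] at hm
  | cons t rest ih =>
      have hmax := PySem.List.max?_isMax hm
      have htM : pvCnt t ≤ M := by
        simpa using hmax (pvCnt t) (by simp)
      rw [PySem.List.enumerate_cons, List.foldl_cons]
      simp only [List.map_cons, pvFindA]
      by_cases h1 : pvCnt t = M
      · -- break at this index: state becomes (M, some s), rest cannot improve
        have : pvStep (b, o) (s, t) = (M, some s) := by
          simp only [pvStep]; rw [if_pos (by omega)]; rw [h1]
        rw [this, pvFold_stop rest (s + 1) M (some s)
              (fun u hu => by simpa using hmax (pvCnt u) (List.mem_map_of_mem (List.mem_cons_of_mem _ hu)))]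
        rw [if_pos (by simpa [pvCnt] using h1)]
      · have hm' : PySem.List.max? (rest.map pvCnt) (fun y => y) = some M := by
          rw [List.map_cons] at hm
          exact pvMax?_cons_of_ne _ _ _ hm (fun h => h1 h)
        have htlt : pvCnt t < M := lt_of_le_of_ne htM h1
        rw [if_neg (by simpa [pvCnt] using h1)]
        by_cases h2 : pvCnt t > b
        · have : pvStep (b, o) (s, t) = (pvCnt t, some s) := by
            simp only [pvStep]; rw [if_pos (by omega)]
          rw [this]; exact ih (s + 1) (pvCnt t) (some s) hm' htlt
        · have : pvStep (b, o) (s, t) = (b, o) := by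
            simp only [pvStep]; rw [if_neg (by omega)]
          rw [this]; exact ih (s + 1) b o hm' hb

-- ===== VERDICT (by name: the statement is the Claim_ definition above) =====
theorem index_of_max_unique_spec : Claim_equal_index_of_max_unique := by
  intro l _ hpre
  unfold Spec_index_of_max_unique index_of_max_unique
  simp only [List.map_map]
  have hmap : (l.map fun i => (((PySem.Set.ofList i : PySem.Set Int).length : Int))) = l.map pvCnt := rfl
  cases hM : PySem.List.max? (l.map pvCnt) (fun y => y) with
  | none =>
      rw [PySem.List.max?_eq_none_iff] at hM
      exact absurd (List.map_eq_nil_iff.mp hM) hpre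
  | some M =>
      have hMmem := PySem.List.max?_mem hM
      have hM0 : 0 ≤ M := by
        rcases List.mem_map.mp hMmem with ⟨t, _, rfl⟩
        exact pvCnt_nonneg t
      have hfold := pvFold_main l 0 (-1) none M hM (by omega)
      rw [pvAlt_eq, hfold]
      simp only [Function.comp_def] at hM ⊢
      rw [show (PySem.List.max? (List.map (fun x => ((PySem.Set.ofList x : PySem.Set Int).length : Int)) l) fun y => y) = some M from hM]
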